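-- pv_equiv track=rewrite | github.com/DwirefS/AgentVault | src/agents/agent_scheduler.py | _matches_event_pattern
-- ===== SOURCE A (Python) =====
-- def _matches_event_pattern(event_name: str, pattern: str) -> bool:
--     """Check if event name matches pattern"""
--     # Simple wildcard matching
--     if pattern == '*':
--         return True
--
--     pattern_parts = pattern.split('.')
--     event_parts = event_name.split('.')
--
--     if len(pattern_parts) != len(event_parts):
--         return False
--
--     for p, e in zip(pattern_parts, event_parts):
--         if p != '*' and p != e:
--             return False
--
--     return True
-- ===== SOURCE B (Python) =====
-- def _matches_event_pattern(event_name: str, pattern: str) -> bool: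
--     """Check if event name matches pattern"""
--     if pattern == '*':
--         return True
--     return _scan(event_name, pattern)
--
--
-- def _scan(e, p):
--     # One char-level pass over both strings, no splitting: at_start is True
--     # exactly at a segment boundary; a '*' that forms a whole pattern segment
--     # swallows event chars up to the next '.'.
--     i, j, n, m = 0, 0, len(e), len(p)
--     at_start = True
--     while True:
--         if j == m:
--             return i == n
--         if p[j] == '*' and at_start and (j + 1 == m or p[j + 1] == '.'):
--             if i < n and e[i] != '.':
--                 i += 1                      # '*' swallows one event char
--                 continue
--             if j + 1 == m:
--                 return i == n
--             if i == n:
--                 return False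
--             i += 1                          # both cross a '.'
--             j += 2
--             at_start = True
--             continue
--         if i < n and e[i] == p[j]:
--             at_start = p[j] == '.'
--             i += 1
--             j += 1
--             continue
--         return False
-- ===== Notes on version B (the rewrite author's own statement) =====
-- stated objective: alternative
-- what changed: Replaces split-into-segments + length check + zip loop with a single recursive char-level scanner over both strings that tracks segment boundaries and lets a whole-segment '*' swallow chars up to the next dot, never materialising the segment lists.
import Mathlib
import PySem

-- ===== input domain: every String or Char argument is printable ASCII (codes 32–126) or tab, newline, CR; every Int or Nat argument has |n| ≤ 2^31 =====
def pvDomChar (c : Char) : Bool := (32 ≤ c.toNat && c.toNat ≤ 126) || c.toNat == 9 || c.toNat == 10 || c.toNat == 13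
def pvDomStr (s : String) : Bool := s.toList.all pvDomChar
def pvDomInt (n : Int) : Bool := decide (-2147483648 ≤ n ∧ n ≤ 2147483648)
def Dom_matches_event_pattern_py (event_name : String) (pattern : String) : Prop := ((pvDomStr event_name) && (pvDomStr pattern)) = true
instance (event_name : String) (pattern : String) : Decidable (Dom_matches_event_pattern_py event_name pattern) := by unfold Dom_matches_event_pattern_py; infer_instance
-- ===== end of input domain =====

-- B replaces split-into-segments + length check + zip loop by ONE recursive
-- char-level scan of both strings (objective: alternative algorithm, same cost).

-- ===== PORT A =====
-- the zip loop "for p, e in zip(...): if p != '*' and p != e: return False / return True"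
def pvLoopA : List (List Char × List Char) → Bool
  | [] => true
  | (p, e) :: rest => if p ≠ ['*'] ∧ p ≠ e then false else pvLoopA rest

def matches_event_pattern_py (event_name : String) (pattern : String) : Bool :=
  if pattern.toList = ['*'] then true
  else
    let pattern_parts := PySem.Chars.splitOn pattern.toList ['.']
    let event_parts := PySem.Chars.splitOn event_name.toList ['.']
    if pattern_parts.length ≠ event_parts.length then false
    else pvLoopA (pattern_parts.zip event_parts)

-- ===== PORT B =====
-- _scan(e, p, at_start) from Source B, on the char lists
def pvScan : List Char → List Char → Bool → Bool
  | e, [], _ => e.isEmpty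
  | e, c :: p', atStart =>
    if c = '*' ∧ atStart = true ∧ (p' = [] ∨ p'.head? = some '.') then
      match e with
      | d :: e' =>
        if d ≠ '.' then pvScan e' (c :: p') true        -- '*' swallows one event char
        else if p' = [] then false                      -- "return not e"
        else pvScan e' p'.tail true                     -- both cross a '.'
      | [] => if p' = [] then true else false
    else
      match e with
      | d :: e' => if d = c then pvScan e' p' (decide (c = '.')) else false
      | [] => false
termination_by e p _ => e.length + p.length
decreasing_by all_goals (simp_all; try omega)

def matches_event_pattern_py_alt (event_name : String) (pattern : String) : Bool :=
  if pattern.toList = ['*'] then true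
  else pvScan event_name.toList pattern.toList true

-- ===== PRECONDITION & SPEC =====
def Spec_matches_event_pattern_py (event_name : String) (pattern : String) (out : Bool) : Prop := out = matches_event_pattern_py_alt event_name pattern
instance (event_name : String) (pattern : String) (out : Bool) : Decidable (Spec_matches_event_pattern_py event_name pattern out) := by unfold Spec_matches_event_pattern_py; infer_instance

-- ===== CLAIM (what is proved, stated in full; the proofs are below) =====
def Claim_equal_matches_event_pattern_py : Prop := ∀ (event_name : String) (pattern : String), Dom_matches_event_pattern_py event_name pattern → Spec_matches_event_pattern_py event_name pattern (matches_event_pattern_py event_name pattern)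

-- ===== LEMMAS AND PROOFS =====

-- a simple structural split-on-'.' used only by the proofs
def pvSplit : List Char → List (List Char)
  | [] => [[]]
  | c :: t =>
    if c = '.' then [] :: pvSplit t
    else
      match pvSplit t with
      | [] => [[c]]          -- unreachable: pvSplit never returns []
      | h :: tl => (c :: h) :: tl

lemma pvSplit_ne_nil (t : List Char) : pvSplit t ≠ [] := by
  cases t with
  | nil => simp [pvSplit]
  | cons c t =>
    simp only [pvSplit]
    split
    · simp
    · cases pvSplit t <;> simp

lemma pvSplit_cons (c : Char) (t : List Char) (hc : c ≠ '.') :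
    ∃ h tl, pvSplit t = h :: tl ∧ pvSplit (c :: t) = (c :: h) :: tl := by
  cases hs : pvSplit t with
  | nil => exact absurd hs (pvSplit_ne_nil t)
  | cons h tl => exact ⟨h, tl, rfl, by simp [pvSplit, hc, hs]⟩

-- PySem's splitOn on separator "." agrees with pvSplit
lemma splitOn_go_eq (l cur : List Char) (acc : List (List Char)) (fuel : Nat)
    (hf : l.length ≤ fuel) :
    PySem.Chars.splitOn.go ['.'] fuel l cur acc =
      acc.reverse ++ (match pvSplit l with
                      | [] => []            -- unreachable
                      | h :: tl => (cur.reverse ++ h) :: tl) := by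
  induction l generalizing cur acc fuel with
  | nil =>
    cases fuel <;> simp [PySem.Chars.splitOn.go, pvSplit]
  | cons c rest ih =>
    cases fuel with
    | zero => simp at hf
    | succ f =>
      simp only [List.length_cons, Nat.succ_le_succ_iff] at hf
      by_cases hc : c = '.'
      · subst hc
        rw [show PySem.Chars.splitOn.go ['.'] (f+1) ('.'::rest) cur acc
              = PySem.Chars.splitOn.go ['.'] f (List.drop 1 ('.'::rest)) [] (cur.reverse :: acc) by
            simp [PySem.Chars.splitOn.go, List.isPrefixOf]]
        rw [List.drop_one, List.tail_cons, ih [] (cur.reverse :: acc) f hf]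
        cases hs : pvSplit rest with
        | nil => exact absurd hs (pvSplit_ne_nil rest)
        | cons h tl => simp [pvSplit, hs]
      · rw [show PySem.Chars.splitOn.go ['.'] (f+1) (c::rest) cur acc
              = PySem.Chars.splitOn.go ['.'] f rest (c :: cur) acc by
            simp [PySem.Chars.splitOn.go, List.isPrefixOf, Ne.symm hc]]
        rw [ih (c :: cur) acc f hf]
        obtain ⟨h, tl, hs, hs'⟩ := pvSplit_cons c rest hc
        simp [hs, hs']

lemma splitOn_eq (l : List Char) : PySem.Chars.splitOn l ['.'] = pvSplit l := by
  rw [PySem.Chars.splitOn, splitOn_go_eq l [] [] (l.length + 1) (by omega)]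
  cases hs : pvSplit l with
  | nil => exact absurd hs (pvSplit_ne_nil l)
  | cons h tl => simp

-- the zip loop generalised: the head pattern segment may use the wildcard only
-- when b = true (scanner at a segment boundary)
def pvLoopGen (b : Bool) : List (List Char × List Char) → Bool
  | [] => true
  | (p, e) :: rest => if (b = true ∧ p = ['*']) ∨ p = e then pvLoopA rest else false

lemma pvLoopGen_true (l : List (List Char × List Char)) : pvLoopGen true l = pvLoopA l := by
  cases l with
  | nil => rfl
  | cons x rest =>
    obtain ⟨p, e⟩ := x
    simp only [pvLoopGen, pvLoopA]
    by_cases h1 : p = ['*'] <;> by_cases h2 : p = e <;> simp [h1, h2]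

-- if the head segment of pvSplit p' is empty then p' is empty or starts with '.'
lemma head_nil_config (p' : List Char) (tl : List (List Char))
    (h : pvSplit p' = [] :: tl) : p' = [] ∨ p'.head? = some '.' := by
  cases p' with
  | nil => exact Or.inl rfl
  | cons c r =>
    by_cases hc : c = '.'
    · exact Or.inr (by simp [hc])
    · obtain ⟨h', tl', _, hs'⟩ := pvSplit_cons c r hc
      rw [hs'] at h
      simp at h

-- Main invariant: the char-level scanner computes exactly A's segment comparison.
theorem pvScan_eq (e p : List Char) (b : Bool) :
    pvScan e p b =
      (decide ((pvSplit p).length = (pvSplit e).length)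
        && pvLoopGen b ((pvSplit p).zip (pvSplit e))) := by
  cases p with
  | nil =>
    cases e with
    | nil => simp [pvScan, pvSplit, pvLoopGen, pvLoopA]
    | cons d e' =>
      by_cases hd : d = '.'
      · subst hd
        have hne := pvSplit_ne_nil e'
        simp [pvScan, pvSplit, pvLoopGen]
        exact fun h => absurd h hne
      · obtain ⟨h, tl, hs, hs'⟩ := pvSplit_cons d e' hd
        rw [hs']
        simp [pvScan, pvSplit, pvLoopGen]
  | cons c p' =>
    by_cases hw : c = '*' ∧ b = true ∧ (p' = [] ∨ p'.head? = some '.')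
    · obtain ⟨hc, hb, hcfg⟩ := hw
      subst hc; subst hb
      rcases hcfg with hnil | hdot
      · -- pattern segment is a final '*' : p = ['*']
        subst hnil
        cases e with
        | nil => simp [pvScan, pvSplit, pvLoopGen, pvLoopA]
        | cons d e' =>
          by_cases hd : d = '.'
          · subst hd
            have hne := pvSplit_ne_nil e'
            simp [pvScan, pvSplit, pvLoopGen]
            exact fun h => absurd h hne
          · obtain ⟨h, tl, hs, hs'⟩ := pvSplit_cons d e' hd
            have ih := pvScan_eq e' ['*'] true
            simp [pvScan, hd, hs, pvSplit, pvLoopGen, pvLoopA] at ih ⊢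
            exact ih
      · -- pattern segment is '*' followed by '.': p = '*' :: '.' :: p''
        obtain ⟨p'', rfl⟩ : ∃ p'', p' = '.' :: p'' := by
          cases p' with
          | nil => simp at hdot
          | cons x r => simp at hdot; exact ⟨r, by simp [hdot]⟩
        cases e with
        | nil =>
          have hne := pvSplit_ne_nil p''
          simp [pvScan, pvSplit, pvLoopGen]
          exact fun h => absurd h hne
        | cons d e' =>
          by_cases hd : d = '.'
          · subst hd
            have ih := pvScan_eq e' p'' true
            simp [pvScan, pvSplit, pvLoopGen, ih]
            cases hz : (pvSplit p'').zip (pvSplit e') with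
            | nil => rfl
            | cons x r =>
              obtain ⟨pp, ee⟩ := x
              by_cases h1 : pp = ['*'] <;> by_cases h2 : pp = ee <;> simp [pvLoopA, h1, h2]
          · obtain ⟨h, tl, hs, hs'⟩ := pvSplit_cons d e' hd
            have ih := pvScan_eq e' ('*' :: '.' :: p'') true
            simp [pvScan, hd, hs, pvSplit, pvLoopGen] at ih ⊢
            exact ih
    · -- literal head character
      by_cases hcdot : c = '.'
      · subst hcdot
        cases e with
        | nil =>
          have hne := pvSplit_ne_nil p'
          simp [pvScan, pvSplit, pvLoopGen]
          exact fun h => absurd h hne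
        | cons d e' =>
          by_cases hd : d = '.'
          · subst hd
            have ih := pvScan_eq e' p' true
            simp [pvScan, pvSplit, pvLoopGen, ih]
            cases hz : (pvSplit p').zip (pvSplit e') with
            | nil => rfl
            | cons x r =>
              obtain ⟨pp, ee⟩ := x
              by_cases h1 : pp = ['*'] <;> by_cases h2 : pp = ee <;> simp [pvLoopA, h1, h2]
          · obtain ⟨h, tl, hs, hs'⟩ := pvSplit_cons d e' hd
            simp [pvScan, hd, pvSplit, pvLoopGen]
            rw [hs]
            intro _
            simp
      · -- c ≠ '.', and the wildcard configuration does not hold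
        obtain ⟨hp, tlp, hsp, hsp'⟩ := pvSplit_cons c p' hcdot
        have hnotstar : ¬ (b = true ∧ c :: hp = ['*']) := by
          rintro ⟨hb, hstar⟩
          have hx : c = '*' ∧ hp = [] := by simpa using hstar
          exact hw ⟨hx.1, hb, head_nil_config p' tlp (hx.2 ▸ hsp)⟩
        have hstar2 : (b && decide (c :: hp = ['*'])) = false := by
          cases b
          · rfl
          · simpa using fun h => hnotstar ⟨rfl, h⟩
        have hbfalse : (b && (decide (c = '*') && decide (hp = []))) = false := by
          by_cases h1 : c = '*'
          · by_cases h2 : hp = []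
            · have : b = false := by
                cases b
                · rfl
                · exact absurd ⟨rfl, by simp [h1, h2]⟩ hnotstar
              simp [this]
            · simp [h2]
          · simp [h1]
        cases e with
        | nil =>
          simp [pvScan, hw, pvSplit, pvLoopGen]
          rw [hsp]
          intro _
          simp [hcdot]
          cases b <;> simp_all
        | cons d e' =>
          by_cases hd : d = '.'
          · subst hd
            have hne := pvSplit_ne_nil e'
            simp [pvScan, hw, pvSplit, pvLoopGen, Ne.symm hcdot]
            rw [hsp]
            intro _
            simp [hcdot]
            cases b <;> simp_all
          · obtain ⟨he, tle, hse, hse'⟩ := pvSplit_cons d e' hd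
            by_cases hdc : d = c
            · subst hdc
              have ih := pvScan_eq e' p' false
              simp [pvScan, hw, hcdot, hsp, hse, pvSplit, pvLoopGen] at ih ⊢
              rw [ih, Bool.and_comm b, Bool.and_assoc] at *
              simp [hbfalse]
            · simp [pvScan, hw, hdc, hcdot, hd, hsp, hse, pvSplit, pvLoopGen]
              intro _ hcond
              rcases hcond with ⟨hb, hc, hhp⟩ | ⟨hcd, _⟩
              · exact absurd ⟨hc, hb, head_nil_config p' tlp (hhp ▸ hsp)⟩ hw
              · exact absurd hcd.symm hdc
termination_by e.length + p.length
decreasing_by all_goals (simp_all; try omega)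

-- ===== VERDICT (by name: the statement is the Claim_ definition above) =====
theorem matches_event_pattern_py_spec : Claim_equal_matches_event_pattern_py := by
  intro event_name pattern _
  unfold Spec_matches_event_pattern_py matches_event_pattern_py matches_event_pattern_py_alt
  by_cases hstar : pattern.toList = ['*']
  · simp [hstar]
  · simp only [hstar, if_false]
    rw [splitOn_eq, splitOn_eq, pvScan_eq]
    by_cases hlen : (pvSplit pattern.toList).length = (pvSplit event_name.toList).length
    · simp [hlen, pvLoopGen_true]
    · simp [hlen]
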